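-- pv_equiv track=rewrite | github.com/itwasdeesey/lab-python | lab13/main.py | interpolate_missing
-- ===== SOURCE A (Python) =====
-- def interpolate_missing(lst):
--     n = len(lst)
--     result = lst[:]
--     for i in range(n):
--         if result[i] is None:
--             left = right = i
--             while left > 0 and result[left] is None:
--                 left -= 1
--             while right < n and result[right] is None:
--                 right += 1
--             left_value = result[left] if left >= 0 else 0
--             right_value = result[right] if right < n else 0
--             if left_value is not None and right_value is not None:
--                 result[i] = (left_value + right_value) // 2
--             elif left_value is not None:
--                 result[i] = left_value
--             elif right_value is not None:
--                 result[i] = right_value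
--     return result
-- ===== SOURCE B (Python) =====
-- def interpolate_missing(lst):
--     n = len(lst)
--     # nxt[i] = first non-None value at index >= i, else None  (one reverse pass)
--     nxt = [None] * n
--     nv = None
--     for i in range(n - 1, -1, -1):
--         if lst[i] is not None:
--             nv = lst[i]
--         nxt[i] = nv
--     # forward pass carrying the previous (already filled) value
--     out = []
--     prev = None
--     for i, x in enumerate(lst):
--         if x is not None:
--             prev = x
--         else:
--             r = nxt[i] if nxt[i] is not None else 0
--             prev = (prev + r) // 2 if prev is not None else r
--         out.append(prev)
--     return out
-- ===== Notes on version B (the rewrite author's own statement) =====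
-- stated objective: alternative
-- what changed: Replaces A's in-place fill with per-None left/right neighbour rescans by a reverse pass precomputing the next non-None value plus a single forward pass carrying the previously filled value.
import Mathlib
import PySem

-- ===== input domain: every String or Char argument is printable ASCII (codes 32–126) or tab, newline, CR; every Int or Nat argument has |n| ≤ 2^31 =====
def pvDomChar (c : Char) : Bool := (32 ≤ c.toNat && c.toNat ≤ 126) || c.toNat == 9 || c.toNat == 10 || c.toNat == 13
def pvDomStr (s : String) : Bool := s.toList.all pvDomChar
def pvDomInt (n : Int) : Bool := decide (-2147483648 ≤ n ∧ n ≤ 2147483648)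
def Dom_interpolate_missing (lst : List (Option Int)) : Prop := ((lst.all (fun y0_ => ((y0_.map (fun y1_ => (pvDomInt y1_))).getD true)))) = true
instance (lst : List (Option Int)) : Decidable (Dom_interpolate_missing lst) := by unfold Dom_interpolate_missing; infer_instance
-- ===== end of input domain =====

-- B replaces A's per-None left/right neighbour rescans by one reverse pass precomputing the
-- next non-None value and one forward pass carrying the previously filled value (alternative algorithm).

-- ===== PORT A =====
-- while left > 0 and result[left] is None: left -= 1
def pvLeftScan (result : List (Option Int)) (left : Nat) : Nat :=
  if h : 0 < left ∧ result.getD left none = none then pvLeftScan result (left - 1) else left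
termination_by left
decreasing_by omega

-- while right < n and result[right] is None: right += 1
def pvRightScan (result : List (Option Int)) (n right : Nat) : Nat :=
  if h : right < n ∧ result.getD right none = none then pvRightScan result n (right + 1) else right
termination_by n - right
decreasing_by omega

-- one iteration of A's outer `for i in range(n)` loop (body mutates `result`)
def pvStepA (n : Nat) (result : List (Option Int)) (i : Nat) : List (Option Int) :=
  match result.getD i none with
  | some _ => result
  | none =>
    let left := pvLeftScan result i
    let right := pvRightScan result n i
    let left_value := result.getD left none            -- left ≥ 0 always holds
    let right_value : Option Int := if right < n then result.getD right none else some 0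
    match left_value, right_value with
    | some lv, some rv => result.set i (some (PySem.Int.floordiv (lv + rv) 2))
    | some lv, none    => result.set i (some lv)
    | none,    some rv => result.set i (some rv)
    | none,    none    => result

def interpolate_missing (lst : List (Option Int)) : List (Option Int) :=
  (List.range lst.length).foldl (pvStepA lst.length) lst

-- ===== PORT B =====
-- reverse pass: nxt[i] = first non-None value at index ≥ i (None if there is none)
def pvBuildNxt : List (Option Int) → List (Option Int)
  | [] => []
  | x :: xs =>
    let rest := pvBuildNxt xs
    (match x with | some v => some v | none => rest.headD none) :: rest

-- forward pass carrying `prev`, consuming lst together with its nxt array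
def pvFwd : List (Option Int) → List (Option Int) → Option Int → List (Option Int)
  | [], _, _ => []
  | x :: xs, nxts, prev =>
    let v : Int :=
      match x with
      | some v => v
      | none =>
        let r := (nxts.headD none).getD 0
        match prev with
        | some p => PySem.Int.floordiv (p + r) 2
        | none => r
    some v :: pvFwd xs nxts.tail (some v)

def interpolate_missing_alt (lst : List (Option Int)) : List (Option Int) :=
  pvFwd lst (pvBuildNxt lst) none

-- ===== PRECONDITION & SPEC =====
def Spec_interpolate_missing (lst : List (Option Int)) (out : List (Option Int)) : Prop := out = interpolate_missing_alt lst
instance (lst : List (Option Int)) (out : List (Option Int)) : Decidable (Spec_interpolate_missing lst out) := by unfold Spec_interpolate_missing; infer_instance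

-- ===== CLAIM (what is proved, stated in full; the proofs are below) =====
def Claim_equal_interpolate_missing : Prop := ∀ (lst : List (Option Int)), Dom_interpolate_missing lst → Spec_interpolate_missing lst (interpolate_missing lst)

-- ===== LEMMAS AND PROOFS =====

-- first non-None value of a list
def pvFirstSome : List (Option Int) → Option Int
  | [] => none
  | some v :: _ => some v
  | none :: xs => pvFirstSome xs

-- functional reference: the forward fill both programs compute
def pvF : Option Int → List (Option Int) → List (Option Int)
  | _, [] => []
  | prev, x :: xs =>
    let v : Int :=
      match x with
      | some v => v
      | none =>
        match prev with
        | some p => PySem.Int.floordiv (p + (pvFirstSome xs).getD 0) 2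
        | none => (pvFirstSome xs).getD 0
    some v :: pvF (some v) xs

-- B's port equals the reference fill
lemma headD_buildNxt (xs : List (Option Int)) : (pvBuildNxt xs).head?.getD none = pvFirstSome xs := by
  induction xs with
  | nil => rfl
  | cons x xs ih =>
    cases x with
    | none => simpa [pvBuildNxt, pvFirstSome] using ih
    | some v => simp [pvBuildNxt, pvFirstSome]

lemma fwd_eq_F (xs : List (Option Int)) (prev : Option Int) :
    pvFwd xs (pvBuildNxt xs) prev = pvF prev xs := by
  induction xs generalizing prev with
  | nil => rfl
  | cons x xs ih =>
    cases x with
    | some v => simp [pvFwd, pvBuildNxt, pvF, ih]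
    | none =>
      cases prev with
      | none => simp [pvFwd, pvBuildNxt, pvF, ih, headD_buildNxt]
      | some p => simp [pvFwd, pvBuildNxt, pvF, ih, headD_buildNxt]

-- list-surgery helpers
lemma getD_append_len (P t : List (Option Int)) (x : Option Int) :
    (P ++ x :: t).getD P.length none = x := by
  induction P with
  | nil => rfl
  | cons a P ih => simpa [List.getD] using ih

lemma set_append_len (P t : List (Option Int)) (x y : Option Int) :
    (P ++ x :: t).set P.length y = P ++ y :: t := by
  induction P with
  | nil => rfl
  | cons a P ih => simpa [List.set] using ih

lemma getD_append_last (P t : List (Option Int)) (p : Int)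
    (h : P.getLast? = some (some p)) :
    (P ++ t).getD (P.length - 1) none = some p := by
  induction P with
  | nil => simp at h
  | cons a P ih =>
    cases P with
    | nil => simp [List.getLast?] at h; simp [List.getD, h]
    | cons b Q =>
      have h2 := ih (by simpa [List.getLast?] using h)
      simp only [List.length_cons, List.cons_append] at h2 ⊢
      simpa [List.getD] using h2

-- the left scan lands on the previously filled value
lemma leftVal (P t : List (Option Int)) (prev : Option Int)
    (hP : match prev with | none => P = [] | some p => P.getLast? = some (some p)) :
    (P ++ none :: t).getD (pvLeftScan (P ++ none :: t) P.length) none = prev := by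
  cases prev with
  | none =>
    subst hP
    rw [pvLeftScan]
    simp
  | some p =>
    have hlen : 0 < P.length := by
      cases P with
      | nil => simp at hP
      | cons a Q => simp
    rw [pvLeftScan]
    rw [dif_pos ⟨hlen, getD_append_len P t none⟩]
    have hv : (P ++ none :: t).getD (P.length - 1) none = some p :=
      getD_append_last P (none :: t) p hP
    rw [pvLeftScan, dif_neg (by rintro ⟨-, h2⟩; rw [hv] at h2; cases h2)]
    exact hv

-- the right scan yields the first non-None value of the suffix (0 past the end)
lemma rightVal (t : List (Option Int)) : ∀ (P : List (Option Int)),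
    (if pvRightScan (P ++ t) (P.length + t.length) P.length < P.length + t.length then
      (P ++ t).getD (pvRightScan (P ++ t) (P.length + t.length) P.length) none
    else some 0) = some ((pvFirstSome t).getD 0) := by
  induction t with
  | nil =>
    intro P
    rw [pvRightScan, dif_neg (by simp)]
    simp [pvFirstSome]
  | cons x t ih =>
    intro P
    cases x with
    | some v =>
      rw [pvRightScan, dif_neg (by rintro ⟨-, h2⟩; rw [getD_append_len P t (some v)] at h2; cases h2)]
      rw [if_pos (by simp), getD_append_len P t (some v)]
      simp [pvFirstSome]
    | none =>
      rw [pvRightScan, dif_pos ⟨by simp, getD_append_len P t none⟩]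
      have := ih (P ++ [none])
      simp only [List.append_assoc, List.cons_append, List.nil_append,
        List.length_append, List.length_cons, List.length_nil] at this ⊢
      have harith : P.length + 1 + t.length = P.length + (t.length + 1) := by omega
      rw [harith] at this
      simpa [pvFirstSome] using this

-- main invariant: A's remaining loop turns P ++ xs into P ++ pvF prev xs
lemma mainA (xs : List (Option Int)) : ∀ (P : List (Option Int)) (prev : Option Int),
    (match prev with | none => P = [] | some p => P.getLast? = some (some p)) →
    (List.range' P.length xs.length).foldl (pvStepA (P.length + xs.length)) (P ++ xs)
      = P ++ pvF prev xs := by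
  induction xs with
  | nil => intro P prev _; simp [pvF]
  | cons x t ih =>
    intro P prev hP
    rw [List.length_cons, List.range'_succ, List.foldl_cons]
    cases x with
    | some v =>
      have hstep : pvStepA (P.length + (t.length + 1)) (P ++ some v :: t) P.length
          = P ++ some v :: t := by
        simp only [pvStepA, getD_append_len]
      rw [hstep]
      have ih' := ih (P ++ [some v]) (some v) (by simp)
      simp only [List.length_append, List.length_cons, List.length_nil,
        List.append_assoc, List.cons_append, List.nil_append] at ih'
      rw [show P.length + 1 + t.length = P.length + (t.length + 1) by omega] at ih'
      rw [show P.length + 1 = P.length + 1 from rfl] at ih'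
      simp only [pvF]
      exact ih'
    | none =>
      have hR := rightVal (none :: t) P
      simp only [List.length_cons, pvFirstSome] at hR
      cases prev with
      | none =>
        have hPe : P = [] := hP
        have hL : (P ++ none :: t).getD (pvLeftScan (P ++ none :: t) P.length) none = none := by
          subst hPe; exact leftVal [] t none rfl
        have hstep : pvStepA (P.length + (t.length + 1)) (P ++ none :: t) P.length
            = P ++ some ((pvFirstSome t).getD 0) :: t := by
          simp only [pvStepA, getD_append_len]
          rw [hL, hR]
          exact set_append_len P t none _
        rw [hstep]
        have ih' := ih (P ++ [some ((pvFirstSome t).getD 0)])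
          (some ((pvFirstSome t).getD 0)) (by simp)
        simp only [List.length_append, List.length_cons, List.length_nil,
          List.append_assoc, List.cons_append, List.nil_append] at ih'
        rw [show P.length + 1 + t.length = P.length + (t.length + 1) by omega] at ih'
        simp only [pvF]
        exact ih'
      | some p =>
        have hL := leftVal P t (some p) hP
        have hstep : pvStepA (P.length + (t.length + 1)) (P ++ none :: t) P.length
            = P ++ some (PySem.Int.floordiv (p + (pvFirstSome t).getD 0) 2) :: t := by
          simp only [pvStepA, getD_append_len]
          rw [hL, hR]
          exact set_append_len P t none _
        rw [hstep]
        have ih' := ih (P ++ [some (PySem.Int.floordiv (p + (pvFirstSome t).getD 0) 2)])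
          (some (PySem.Int.floordiv (p + (pvFirstSome t).getD 0) 2)) (by simp)
        simp only [List.length_append, List.length_cons, List.length_nil,
          List.append_assoc, List.cons_append, List.nil_append] at ih'
        rw [show P.length + 1 + t.length = P.length + (t.length + 1) by omega] at ih'
        simp only [pvF]
        exact ih'

theorem interpolate_missing_spec : Claim_equal_interpolate_missing := by
  intro lst _
  show interpolate_missing lst = interpolate_missing_alt lst
  have h := mainA lst [] none rfl
  simp only [List.length_nil, List.nil_append, Nat.zero_add] at h
  unfold interpolate_missing interpolate_missing_alt
  rw [List.range_eq_range', h, fwd_eq_F]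

-- ===== VERDICT (by name: the statement is the Claim_ definition above) =====
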